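-- pv_equiv track=rewrite | github.com/Oaklight/onehub_prices | src/_vendor/yaml.py | _unescape_double_quoted
-- ===== SOURCE A (Python) =====
-- _DQ_ESCAPE_MAP = {
--     "\\": "\\",
--     '"': '"',
--     "n": "\n",
--     "r": "\r",
--     "t": "\t",
--     "0": "\0",
--     "a": "\a",
--     "b": "\b",
--     "e": "\x1b",
--     "v": "\v",
--     "/": "/",
--     " ": " ",
--     "N": "\x85",
--     "_": "\xa0",
-- }
--
-- def _unescape_double_quoted(s: str) -> str:
--     """Process escape sequences in a double-quoted YAML string."""
--     result: list[str] = []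
--     i = 0
--     while i < len(s):
--         if s[i] == "\\" and i + 1 < len(s):
--             nxt = s[i + 1]
--             if nxt in _DQ_ESCAPE_MAP:
--                 result.append(_DQ_ESCAPE_MAP[nxt])
--                 i += 2
--             elif nxt == "x" and i + 3 < len(s):
--                 result.append(chr(int(s[i + 2 : i + 4], 16)))
--                 i += 4
--             elif nxt == "u" and i + 5 < len(s):
--                 result.append(chr(int(s[i + 2 : i + 6], 16)))
--                 i += 6
--             elif nxt == "U" and i + 9 < len(s):
--                 result.append(chr(int(s[i + 2 : i + 10], 16)))
--                 i += 10
--             else: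
--                 result.append(s[i])
--                 i += 1
--         else:
--             result.append(s[i])
--             i += 1
--     return "".join(result)
-- ===== SOURCE B (Python) =====
-- _DQ_ESCAPE_MAP = {
--     "\\": "\\",
--     '"': '"',
--     "n": "\n",
--     "r": "\r",
--     "t": "\t",
--     "0": "\0",
--     "a": "\a",
--     "b": "\b",
--     "e": "\x1b",
--     "v": "\v",
--     "/": "/",
--     " ": " ",
--     "N": "\x85",
--     "_": "\xa0",
-- }
--
--
-- def _unescape_double_quoted(s: str) -> str:
--     """Process escape sequences in a double-quoted YAML string.
--
--     Chunked rewrite: jump straight to each backslash with str.find and copy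
--     the plain text between escapes as whole slices.
--     """
--     n = len(s)
--     result: list[str] = []
--     i = 0
--     while i < n:
--         j = s.find("\\", i)
--         if j < 0 or j + 1 >= n:
--             # no further escape can start: copy the whole tail (including a
--             # possible lone trailing backslash) and stop
--             result.append(s[i:])
--             break
--         result.append(s[i:j])
--         nxt = s[j + 1]
--         if nxt in _DQ_ESCAPE_MAP:
--             result.append(_DQ_ESCAPE_MAP[nxt])
--             i = j + 2
--         elif nxt == "x" and j + 3 < n:
--             result.append(chr(int(s[j + 2 : j + 4], 16)))
--             i = j + 4
--         elif nxt == "u" and j + 5 < n: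
--             result.append(chr(int(s[j + 2 : j + 6], 16)))
--             i = j + 6
--         elif nxt == "U" and j + 9 < n:
--             result.append(chr(int(s[j + 2 : j + 10], 16)))
--             i = j + 10
--         else:
--             result.append("\\")
--             i = j + 1
--     return "".join(result)
-- ===== Notes on version B (the rewrite author's own statement) =====
-- stated objective: faster
-- what changed: Replaces the per-character while-loop (one branch test and one-char append per character) by a chunked scan that jumps to the next backslash with str.find and copies the plain text between escapes as whole slices, dispatching on the escape character only at backslashes.
-- outside the precondition, e.g. on _unescape_double_quoted('\\\\xzz'): A returns '\\xzz', B returns '\\xzz'; on _unescape_double_quoted('\\\\ud800'): A returns '\\ud800', B returns '\\ud800'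
import Mathlib
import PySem

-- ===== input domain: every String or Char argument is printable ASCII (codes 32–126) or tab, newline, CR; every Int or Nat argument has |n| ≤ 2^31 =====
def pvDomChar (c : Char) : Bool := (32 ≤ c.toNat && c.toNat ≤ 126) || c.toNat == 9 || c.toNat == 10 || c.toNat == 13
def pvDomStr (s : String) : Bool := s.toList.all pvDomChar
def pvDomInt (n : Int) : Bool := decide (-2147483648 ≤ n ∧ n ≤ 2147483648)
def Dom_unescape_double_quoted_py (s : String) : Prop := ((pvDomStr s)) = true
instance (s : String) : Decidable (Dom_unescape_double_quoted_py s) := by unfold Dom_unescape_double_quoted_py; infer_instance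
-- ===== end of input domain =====

-- B replaces A's per-character scan by a chunked scan that jumps to the next backslash
-- (str.find) and copies the plain text between escapes as whole slices; same escape logic.


-- shared helpers (the _DQ_ESCAPE_MAP lookup and chr(int(payload, 16))), used by both ports

def pvEscMap? (c : Char) : Option Char :=
  if c = '\\' then some '\\'
  else if c = '"' then some '"'
  else if c = 'n' then some (Char.ofNat 10)
  else if c = 'r' then some (Char.ofNat 13)
  else if c = 't' then some (Char.ofNat 9)
  else if c = '0' then some (Char.ofNat 0)
  else if c = 'a' then some (Char.ofNat 7)
  else if c = 'b' then some (Char.ofNat 8)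
  else if c = 'e' then some (Char.ofNat 27)
  else if c = 'v' then some (Char.ofNat 11)
  else if c = '/' then some '/'
  else if c = ' ' then some ' '
  else if c = 'N' then some (Char.ofNat 0x85)
  else if c = '_' then some (Char.ofNat 0xa0)
  else none

-- chr(int(payload, 16)): none exactly where Python raises (bad hex, negative, > 0x10FFFF)
-- or where the result is a lone surrogate (not a Lean Char); Pre_ excludes the none cases.
def pyChrHex? (payload : List Char) : Option Char :=
  match PySem.Int.ofCharsBase? payload 16 with
  | some v => if 0 ≤ v ∧ Nat.isValidChar v.toNat then some (Char.ofNat v.toNat) else none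
  | none => none

-- ===== PORT A =====
-- A's while-loop over index i, transcribed as recursion on the remaining suffix
-- (position i ↦ suffix cs; on a hex escape that Python would raise on — pyChrHex? = none,
-- outside Pre_ — the port falls through to the else branch).
def unescACore (cs : List Char) : List Char :=
  match cs with
  | [] => []
  | c :: rest =>
    if c = '\\' ∧ rest ≠ [] then
      let nxt := rest.headD ' '
      match pvEscMap? nxt with
      | some r => r :: unescACore (rest.drop 1)
      | none =>
        if nxt = 'x' ∧ 3 ≤ rest.length then
          match pyChrHex? ((rest.drop 1).take 2) with
          | some ch => ch :: unescACore (rest.drop 3)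
          | none => c :: unescACore rest
        else if nxt = 'u' ∧ 5 ≤ rest.length then
          match pyChrHex? ((rest.drop 1).take 4) with
          | some ch => ch :: unescACore (rest.drop 5)
          | none => c :: unescACore rest
        else if nxt = 'U' ∧ 9 ≤ rest.length then
          match pyChrHex? ((rest.drop 1).take 8) with
          | some ch => ch :: unescACore (rest.drop 9)
          | none => c :: unescACore rest
        else c :: unescACore rest
    else c :: unescACore rest
termination_by cs.length
decreasing_by all_goals (simp [List.length_drop]; try omega)

def unescape_double_quoted_py (s : String) : String := String.ofList (unescACore s.toList)

-- ===== PORT B =====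
-- Source B's chunked loop: find the next backslash (findIdx? = s.find('\\', i) on the suffix),
-- copy the plain chunk whole, dispatch once, recurse on the rest.
def unescBCore (cs : List Char) : List Char :=
  match cs.findIdx? (· = '\\') with
  | none => cs                                   -- j < 0: append s[i:], stop
  | some j =>
    if _hle : cs.length ≤ j + 1 then cs             -- j + 1 >= n: tail incl. lone backslash
    else
      let nxt := (cs.drop (j+1)).headD ' '
      cs.take j ++
        (match pvEscMap? nxt with
         | some r => r :: unescBCore (cs.drop (j+2))
         | none =>
           if nxt = 'x' ∧ j + 3 < cs.length then
             match pyChrHex? ((cs.drop (j+2)).take 2) with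
             | some ch => ch :: unescBCore (cs.drop (j+4))
             | none => '\\' :: unescBCore (cs.drop (j+1))
           else if nxt = 'u' ∧ j + 5 < cs.length then
             match pyChrHex? ((cs.drop (j+2)).take 4) with
             | some ch => ch :: unescBCore (cs.drop (j+6))
             | none => '\\' :: unescBCore (cs.drop (j+1))
           else if nxt = 'U' ∧ j + 9 < cs.length then
             match pyChrHex? ((cs.drop (j+2)).take 8) with
             | some ch => ch :: unescBCore (cs.drop (j+10))
             | none => '\\' :: unescBCore (cs.drop (j+1))
           else '\\' :: unescBCore (cs.drop (j+1)))
termination_by cs.length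
decreasing_by all_goals (simp [List.length_drop]; try omega)

def unescape_double_quoted_py_alt (s : String) : String := String.ofList (unescBCore s.toList)

-- ===== PRECONDITION & SPEC =====
-- Pre_ excludes strings where some "\x"/"\u"/"\U" hex escape would make Python's
-- int(..., 16) or chr raise ValueError, or produce a lone surrogate (not representable as
-- a Lean String); it over-approximates by also excluding such a bad pattern at a position
-- the scan would not actually treat as an escape start (e.g. after an escaped backslash).
def Pre_unescape_double_quoted_py (s : String) : Prop :=
  ∀ i < s.toList.length, s.toList.getD i ' ' = '\\' →
    (s.toList.getD (i+1) ' ' = 'x' → i + 3 < s.toList.length →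
      (pyChrHex? ((s.toList.drop (i+2)).take 2)).isSome = true) ∧
    (s.toList.getD (i+1) ' ' = 'u' → i + 5 < s.toList.length →
      (pyChrHex? ((s.toList.drop (i+2)).take 4)).isSome = true) ∧
    (s.toList.getD (i+1) ' ' = 'U' → i + 9 < s.toList.length →
      (pyChrHex? ((s.toList.drop (i+2)).take 8)).isSome = true)
instance (s : String) : Decidable (Pre_unescape_double_quoted_py s) := by
  unfold Pre_unescape_double_quoted_py; exact Nat.decidableBallLT _ _

def pvWitness_unescape_double_quoted_py : String := "a\\n\\x41 \\u00e9\\q"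

def Spec_unescape_double_quoted_py (s : String) (out : String) : Prop := out = unescape_double_quoted_py_alt s
instance (s : String) (out : String) : Decidable (Spec_unescape_double_quoted_py s out) := by unfold Spec_unescape_double_quoted_py; infer_instance

-- ===== CLAIM (what is proved, stated in full; the proofs are below) =====
def Claim_equal_unescape_double_quoted_py : Prop := ∀ (s : String), Dom_unescape_double_quoted_py s → Pre_unescape_double_quoted_py s → Spec_unescape_double_quoted_py s (unescape_double_quoted_py s)

-- ===== LEMMAS AND PROOFS =====

-- A copies a non-escape-start head verbatim
theorem unescACore_cons_of_not (c : Char) (rest : List Char)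
    (h : ¬ (c = '\\' ∧ rest ≠ [])) : unescACore (c :: rest) = c :: unescACore rest := by
  rw [unescACore]; simp only [if_neg h]

theorem unescACore_append_of_no_bs (pre cs : List Char)
    (h : ∀ c ∈ pre, ¬ c = '\\') : unescACore (pre ++ cs) = pre ++ unescACore cs := by
  induction pre with
  | nil => simp
  | cons c pre ih =>
    have hc : ¬ c = '\\' := h c (by simp)
    simp only [List.cons_append]
    rw [unescACore_cons_of_not c _ (by simp [hc])]
    rw [ih (fun d hd => h d (by simp [hd]))]

theorem unescACore_eq_self_of_no_bs (cs : List Char)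
    (h : ∀ c ∈ cs, ¬ c = '\\') : unescACore cs = cs := by
  have := unescACore_append_of_no_bs cs [] h
  simpa [unescACore] using this

-- A's step at a backslash with a nonempty tail, written out
theorem unescACore_cons_bs (rest : List Char) (hne : rest ≠ []) :
    unescACore ('\\' :: rest) =
      (match pvEscMap? (rest.headD ' ') with
       | some r => r :: unescACore (rest.drop 1)
       | none =>
         if rest.headD ' ' = 'x' ∧ 3 ≤ rest.length then
           match pyChrHex? ((rest.drop 1).take 2) with
           | some ch => ch :: unescACore (rest.drop 3)
           | none => '\\' :: unescACore rest
         else if rest.headD ' ' = 'u' ∧ 5 ≤ rest.length then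
           match pyChrHex? ((rest.drop 1).take 4) with
           | some ch => ch :: unescACore (rest.drop 5)
           | none => '\\' :: unescACore rest
         else if rest.headD ' ' = 'U' ∧ 9 ≤ rest.length then
           match pyChrHex? ((rest.drop 1).take 8) with
           | some ch => ch :: unescACore (rest.drop 9)
           | none => '\\' :: unescACore rest
         else '\\' :: unescACore rest) := by
  rw [unescACore]
  rw [if_pos ⟨rfl, hne⟩]

theorem coreEq_aux : ∀ n (cs : List Char), cs.length ≤ n → unescACore cs = unescBCore cs := by
  intro n
  induction n with
  | zero =>
    intro cs h
    have hnil : cs = [] := List.eq_nil_of_length_eq_zero (Nat.le_zero.mp h)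
    subst hnil
    rw [unescACore, unescBCore]; simp
  | succ n ih =>
    intro cs hlen
    rw [unescBCore]
    cases hj : cs.findIdx? (· = '\\') with
    | none =>
      simp only
      refine unescACore_eq_self_of_no_bs cs ?_
      have := List.findIdx?_eq_none_iff.mp hj
      intro c hc
      simpa using this c hc
    | some j =>
      simp only
      obtain ⟨hjlen, hpj, hbefore⟩ := List.findIdx?_eq_some_iff_getElem.mp hj
      have hgetj : cs[j] = '\\' := by simpa using hpj
      have htake : ∀ c ∈ cs.take j, ¬ c = '\\' := by
        intro c hc
        obtain ⟨k, hk, hck⟩ := List.mem_iff_getElem.mp hc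
        have hkj : k < j := by simp [List.length_take] at hk; omega
        have hkl : k < cs.length := by omega
        have hgk : (cs.take j)[k] = cs[k]'hkl := List.getElem_take
        have hnb : ¬ cs[k] = '\\' := by simpa using hbefore k hkj
        intro hcbs
        exact hnb (by rw [← hck, hgk] at hcbs; exact hcbs)
      have hdropj : cs.drop j = '\\' :: cs.drop (j+1) := by
        rw [List.drop_eq_getElem_cons hjlen, hgetj]
      have hA : unescACore cs = cs.take j ++ unescACore ('\\' :: cs.drop (j+1)) := by
        conv_lhs => rw [← List.take_append_drop j cs]
        rw [unescACore_append_of_no_bs _ _ htake, hdropj]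
      by_cases hle : cs.length ≤ j + 1
      · rw [dif_pos hle]
        have hnil : cs.drop (j+1) = [] := List.drop_eq_nil_of_le hle
        rw [hA, hnil, unescACore_cons_of_not _ _ (by simp)]
        conv_rhs => rw [← List.take_append_drop j cs, hdropj, hnil]
        rw [unescACore]
      · rw [dif_neg hle]
        have hne : cs.drop (j+1) ≠ [] := by
          intro hcon
          have := congrArg List.length hcon
          simp [List.length_drop] at this
          omega
        rw [hA, unescACore_cons_bs _ hne]
        have IH : ∀ k : Nat, 1 ≤ k → unescACore (cs.drop (j+k)) = unescBCore (cs.drop (j+k)) := by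
          intro k hk
          exact ih _ (by simp [List.length_drop]; omega)
        have e1 : (cs.drop (j+1)).drop 1 = cs.drop (j+2) := by
          rw [List.drop_drop]
        have e3 : (cs.drop (j+1)).drop 3 = cs.drop (j+4) := by
          rw [List.drop_drop]
        have e5 : (cs.drop (j+1)).drop 5 = cs.drop (j+6) := by
          rw [List.drop_drop]
        have e9 : (cs.drop (j+1)).drop 9 = cs.drop (j+10) := by
          rw [List.drop_drop]
        have g3 : (3 ≤ (cs.drop (j+1)).length) ↔ (j + 3 < cs.length) := by
          rw [List.length_drop]; omega
        have g5 : (5 ≤ (cs.drop (j+1)).length) ↔ (j + 5 < cs.length) := by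
          rw [List.length_drop]; omega
        have g9 : (9 ≤ (cs.drop (j+1)).length) ↔ (j + 9 < cs.length) := by
          rw [List.length_drop]; omega
        simp only [e1, e3, e5, e9, g3, g5, g9]
        simp only [IH 1 (by norm_num), IH 2 (by norm_num), IH 4 (by norm_num),
                   IH 6 (by norm_num), IH 10 (by norm_num)]

-- ===== VERDICT (by name: the statement is the Claim_ definition above) =====
theorem unescape_double_quoted_py_spec : Claim_equal_unescape_double_quoted_py := by
  intro s _ _
  unfold Spec_unescape_double_quoted_py unescape_double_quoted_py unescape_double_quoted_py_alt
  rw [coreEq_aux s.toList.length s.toList le_rfl]
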